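-- pv_equiv track=rewrite | github.com/Johnsoncharless1976/market-forecaster | src/zen_rules.py | candle_structure
-- ===== SOURCE A (Python) =====
-- def candle_structure(last_candles: list) -> str:
--     """
--     Accepts list of OHLC candle dicts: [{"o":, "h":, "l":, "c":}, ...]
--     Uses last few bars to classify structure.
--     """
--     if not last_candles or len(last_candles) < 3:
--         return "neutral chop"
--
--     closes = [c["c"] for c in last_candles[-3:]]
--     if closes[-1] > closes[0] and all(closes[i] <= closes[i+1] for i in range(2)):
--         return "trend bullish"
--     elif closes[-1] < closes[0] and all(closes[i] >= closes[i+1] for i in range(2)):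
--         return "trend bearish"
--     else:
--         return "neutral chop"
-- ===== SOURCE B (Python) =====
-- def candle_structure(last_candles: list) -> str:
--     """
--     Accepts list of OHLC candle dicts: [{"o":, "h":, "l":, "c":}, ...]
--     Uses last few bars to classify structure.
--     """
--     if not last_candles or len(last_candles) < 3:
--         return "neutral chop"
--
--     closes = [c["c"] for c in last_candles[-3:]]
--     if closes == sorted(closes) and closes[0] != closes[-1]:
--         return "trend bullish"
--     if closes == sorted(closes, reverse=True) and closes[0] != closes[-1]:
--         return "trend bearish"
--     return "neutral chop"
-- ===== Notes on version B (the rewrite author's own statement) =====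
-- stated objective: idiomatic
-- what changed: Replaces the pairwise index scan plus strict endpoint comparison with a sortedness test (closes == sorted(closes)) combined with an endpoint-inequality guard closes[0] != closes[-1].
import Mathlib
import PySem

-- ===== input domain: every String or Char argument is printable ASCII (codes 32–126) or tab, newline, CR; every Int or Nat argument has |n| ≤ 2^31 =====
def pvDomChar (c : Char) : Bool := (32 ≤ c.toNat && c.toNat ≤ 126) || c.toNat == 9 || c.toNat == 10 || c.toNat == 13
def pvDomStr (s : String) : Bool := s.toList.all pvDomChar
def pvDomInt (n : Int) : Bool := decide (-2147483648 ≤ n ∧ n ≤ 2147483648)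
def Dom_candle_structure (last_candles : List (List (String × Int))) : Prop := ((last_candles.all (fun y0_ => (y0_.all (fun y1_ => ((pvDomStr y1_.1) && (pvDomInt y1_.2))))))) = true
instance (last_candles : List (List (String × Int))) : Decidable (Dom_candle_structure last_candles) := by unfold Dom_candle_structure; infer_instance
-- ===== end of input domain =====

-- B replaces the pairwise index scan with a sortedness test plus an endpoint-inequality guard (idiomatic; same cost).

-- ===== PORT A =====
def candle_structure (last_candles : List (List (String × Int))) : String :=
  if last_candles = [] ∨ last_candles.length < 3 then "neutral chop"
  else
    let closes := (PySem.List.slice last_candles (some (-3)) none).map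
      (fun c => ((PySem.Dict.mk c).get? "c").getD 0)
    if PySem.List.pyGetD closes 0 0 < PySem.List.pyGetD closes (-1) 0 ∧
       (PySem.List.pyRange 0 2 1).all
         (fun i => PySem.List.pyGetD closes i 0 ≤ PySem.List.pyGetD closes (i+1) 0)
    then "trend bullish"
    else if PySem.List.pyGetD closes (-1) 0 < PySem.List.pyGetD closes 0 0 ∧
       (PySem.List.pyRange 0 2 1).all
         (fun i => PySem.List.pyGetD closes (i+1) 0 ≤ PySem.List.pyGetD closes i 0)
    then "trend bearish"
    else "neutral chop"

-- ===== PORT B =====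
def candle_structure_alt (last_candles : List (List (String × Int))) : String :=
  if last_candles = [] ∨ last_candles.length < 3 then "neutral chop"
  else
    let closes := (PySem.List.slice last_candles (some (-3)) none).map
      (fun c => ((PySem.Dict.mk c).get? "c").getD 0)
    if closes = PySem.List.sorted closes (fun x => x) false ∧
       PySem.List.pyGetD closes 0 0 ≠ PySem.List.pyGetD closes (-1) 0
    then "trend bullish"
    else if closes = PySem.List.sorted closes (fun x => x) true ∧
       PySem.List.pyGetD closes 0 0 ≠ PySem.List.pyGetD closes (-1) 0
    then "trend bearish"
    else "neutral chop"

-- ===== PRECONDITION & SPEC =====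
-- Pre_ excludes exactly the inputs where Python A raises KeyError: one of the last three candles lacks key "c".
def Pre_candle_structure (last_candles : List (List (String × Int))) : Prop :=
  last_candles.length < 3 ∨
    ∀ c ∈ PySem.List.slice last_candles (some (-3)) none, (PySem.Dict.mk c).contains "c" = true
instance (last_candles : List (List (String × Int))) : Decidable (Pre_candle_structure last_candles) := by unfold Pre_candle_structure; infer_instance
def pvWitness_candle_structure : (List (List (String × Int))) :=
  [[("c", 1)], [("c", 2)], [("c", 3)]]

def Spec_candle_structure (last_candles : List (List (String × Int))) (out : String) : Prop := out = candle_structure_alt last_candles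
instance (last_candles : List (List (String × Int))) (out : String) : Decidable (Spec_candle_structure last_candles out) := by unfold Spec_candle_structure; infer_instance

-- ===== CLAIM (what is proved, stated in full; the proofs are below) =====
def Claim_equal_candle_structure : Prop := ∀ (last_candles : List (List (String × Int))), Dom_candle_structure last_candles → Pre_candle_structure last_candles → Spec_candle_structure last_candles (candle_structure last_candles)

-- ===== LEMMAS AND PROOFS =====

-- sortedness of an Int list = pairwise ≤ (resp. ≥ for reverse=True)
lemma sorted_id_iff_pairwise (xs : List Int) :
    xs = PySem.List.sorted xs (fun x => x) false ↔ xs.Pairwise (· ≤ ·) := by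
  constructor
  · intro h
    have := PySem.List.sorted_pairwise (xs := xs) (key := fun x => x) (κ := Int)
    rw [← h] at this
    exact this
  · intro h
    exact (PySem.List.sorted_eq_self_of_pairwise xs (fun x => x) h).symm

lemma sorted_id_rev_iff_pairwise (xs : List Int) :
    xs = PySem.List.sorted xs (fun x => x) true ↔ xs.Pairwise (fun a b => b ≤ a) := by
  constructor
  · intro h
    have := PySem.List.sorted_pairwise_rev (xs := xs) (key := fun x => x) (κ := Int)
    rw [← h] at this
    exact this
  · intro h
    exact (PySem.List.sorted_rev_eq_self_of_pairwise xs (fun x => x) h).symm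

-- the two classifications agree on any 3 closes
lemma classify3_eq (x y z : Int) :
    (if x < z ∧ ((PySem.List.pyRange 0 2 1).all
        (fun i => PySem.List.pyGetD [x, y, z] i 0 ≤ PySem.List.pyGetD [x, y, z] (i+1) 0))
     then "trend bullish"
     else if z < x ∧ ((PySem.List.pyRange 0 2 1).all
        (fun i => PySem.List.pyGetD [x, y, z] (i+1) 0 ≤ PySem.List.pyGetD [x, y, z] i 0))
     then "trend bearish"
     else "neutral chop")
    = (if [x, y, z] = PySem.List.sorted [x, y, z] (fun a => a) false ∧ x ≠ z
       then "trend bullish"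
       else if [x, y, z] = PySem.List.sorted [x, y, z] (fun a => a) true ∧ x ≠ z
       then "trend bearish"
       else "neutral chop") := by
  rw [show (PySem.List.pyRange 0 2 1) = [0, 1] from by decide]
  simp [PySem.List.pyGetD, PySem.List.pyGet?, PySem.List.pyIdx?,
    sorted_id_iff_pairwise, sorted_id_rev_iff_pairwise, List.pairwise_cons]
  split_ifs <;> first | rfl | omega

-- the last-3 slice of a list of length ≥ 3 has exactly 3 elements
lemma list_len3 {A : Type} (l : List A) (h : l.length = 3) : ∃ a b c, l = [a, b, c] := by
  match l, h with
  | [a, b, c], _ => exact ⟨a, b, c, rfl⟩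

lemma slice_last3 (xs : List (List (String × Int))) (h : 3 ≤ xs.length) :
    ∃ a b c, PySem.List.slice xs (some (-3)) none = [a, b, c] := by
  rw [PySem.List.slice_some_none]
  apply list_len3
  simp [PySem.List.clampIdx]
  rw [if_neg (by omega : ¬ (xs.length < 3))]
  omega

-- ===== VERDICT (by name: the statement is the Claim_ definition above) =====
theorem candle_structure_spec : Claim_equal_candle_structure := by
  intro lc _ _
  unfold Spec_candle_structure candle_structure candle_structure_alt
  by_cases hlen : lc = [] ∨ lc.length < 3
  · simp [hlen]
  · simp only [hlen, if_false]
    have h3 : 3 ≤ lc.length := by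
      simp only [not_or, not_lt] at hlen
      omega
    obtain ⟨a, b, c, hslice⟩ := slice_last3 lc h3
    rw [hslice]
    simp only [List.map_cons, List.map_nil]
    have := classify3_eq (((PySem.Dict.mk a).get? "c").getD 0)
      (((PySem.Dict.mk b).get? "c").getD 0) (((PySem.Dict.mk c).get? "c").getD 0)
    simp only [PySem.List.pyGetD, PySem.List.pyGet?, PySem.List.pyIdx?] at this ⊢
    convert this using 2
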